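-- pv_equiv track=rewrite | github.com/mephisto1484/Myleetcode | Python/3298. 统计重新排列后包含另一个字符串的子字符串数目 II copy.py | validSubstringCount
-- ===== SOURCE A (Python) =====
-- def validSubstringCount(word1: str, word2: str) -> int:
--     # 使用列表代替字典，索引为字母的ASCII值减去'a'的ASCII值
--     map2 = [0] * 26
--     mem = [0] * 26
--
--     # 初始化map2
--     for val in word2:
--         idx = ord(val) - ord('a')
--         map2[idx] += 1
--
--     match, len1, len2 = 0, len(word1), len(word2)
--     if len1 < len2:
--         return 0
--
--     # 用于存储可行的结束位置 end是可达的
--     end_location = []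
--     begin, end = 0, -1
--
--     # 初始化窗口
--     for i, val in enumerate(word1):
--         idx = ord(val) - ord('a')
--         if map2[idx] > 0:
--             mem[idx] += 1
--             if mem[idx] <= map2[idx]:
--                 match += 1
--         if match == len2:
--             end = i
--             break
--
--     if match != len2:
--         return 0
--     end_location.append(end)
--
--     while True:
--         # 移动左指针
--         begin_idx = ord(word1[begin]) - ord('a')
--         if map2[begin_idx] > 0:
--             mem[begin_idx] -= 1
--             if mem[begin_idx] < map2[begin_idx]:
--                 # 失去匹配，移动右边
--                 end += 1
--                 while end < len1:
--                     end_idx = ord(word1[end]) - ord('a')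
--                     if map2[end_idx] > 0:
--                         mem[end_idx] += 1
--                         if word1[end] == word1[begin]:
--                             end_location.append(end)
--                             begin += 1
--                             break
--                         else:
--                             end += 1
--                     else:
--                         end += 1
--                 if end == len1:
--                     break
--             else:
--                 begin += 1
--                 end_location.append(end)
--         else:
--             begin += 1
--             end_location.append(end)
--
--     return len(end_location) * len1 - sum(end_location)
-- ===== SOURCE B (Python) =====
-- def validSubstringCount(word1: str, word2: str) -> int:
--     # brute force: for each start, scan right with fresh counts until word2 is covered
--     need = [0] * 26
--     for c in word2:
--         need[ord(c) - ord('a')] += 1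
--     n, m = len(word1), len(word2)
--     if n < m:
--         return 0
--     total = 0
--     for begin in range(n):
--         have = [0] * 26
--         missing = m
--         for end in range(begin, n):
--             i = ord(word1[end]) - ord('a')
--             if have[i] < need[i]:
--                 missing -= 1
--             have[i] += 1
--             if missing == 0:
--                 total += n - end
--                 break
--     return total
-- ===== Notes on version B (the rewrite author's own statement) =====
-- stated objective: simpler
-- what changed: Replaced A's incremental two-pointer scan (shared counter array, an end_location list of minimal ends, and a char-equality rescan to regain a lost match) by a plain brute force: for each start position, scan right with fresh counters until word2 is covered and add n-end.
-- outside the precondition, e.g. on validSubstringCount('G`a', 'a'): A returns 3, B returns 5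
import Mathlib
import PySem

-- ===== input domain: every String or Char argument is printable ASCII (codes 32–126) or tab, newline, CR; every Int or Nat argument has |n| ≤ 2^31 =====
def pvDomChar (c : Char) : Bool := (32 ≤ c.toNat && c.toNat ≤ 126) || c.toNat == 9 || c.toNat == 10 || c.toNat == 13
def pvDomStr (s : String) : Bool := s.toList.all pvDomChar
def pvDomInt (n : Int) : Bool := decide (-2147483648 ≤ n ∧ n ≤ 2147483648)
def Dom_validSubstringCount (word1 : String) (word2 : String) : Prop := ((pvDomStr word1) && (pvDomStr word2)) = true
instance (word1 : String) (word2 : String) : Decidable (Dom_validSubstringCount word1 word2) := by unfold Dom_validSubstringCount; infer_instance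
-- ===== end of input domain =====

-- B replaces A's incremental two-pointer scan by a per-start brute-force rescan (simpler); A and B
-- are proved to agree on Pre_ (nonempty lowercase word2, word1 lowercase unless shorter than word2).


-- ===== PORT A =====
-- Python's 26-entry count lists are modelled as total functions on the computed index
-- ord(c)-97; this is exact for the indices 0..25, i.e. on the lowercase inputs Pre_ admits.
def pvIdx (c : Char) : Int := (c.toNat : Int) - 97

def pvUpd (f : Int → Int) (i : Int) (d : Int) : Int → Int := fun j => if j = i then f j + d else f j

-- `for val in word2: map2[idx] += 1`  (also used, identically, by Source B's need-building loop)
def pvCount26 (l : List Char) : Int → Int := l.foldl (fun m c => pvUpd m (pvIdx c) 1) (fun _ => 0)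

-- A's first loop: `for i, val in enumerate(word1): … if match == len2: end = i; break`
def pvA_scan (map2 : Int → Int) (len2 : Int) :
    List Char → Int → (Int → Int) → Int → ((Int → Int) × Int × Int)
  | [], _, mem, mtch => (mem, mtch, -1)
  | c :: rest, i, mem, mtch =>
    let idx := pvIdx c
    let p :=
      if map2 idx > 0 then
        let mem2 := pvUpd mem idx 1
        (mem2, if mem2 idx ≤ map2 idx then mtch + 1 else mtch)
      else (mem, mtch)
    if p.2 = len2 then (p.1, p.2, i)
    else pvA_scan map2 len2 rest (i + 1) p.1 p.2

-- A's inner `while end < len1: …` rescan (the remaining suffix of word1 is passed as a list);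
-- the Bool is true iff the loop stopped via the `word1[end] == word1[begin]` break.
def pvA_inner (map2 : Int → Int) (bc : Char) :
    List Char → Int → (Int → Int) → (Int × (Int → Int) × Bool)
  | [], e, mem => (e, mem, false)
  | c :: rest, e, mem =>
    if map2 (pvIdx c) > 0 then
      let mem' := pvUpd mem (pvIdx c) 1
      if c = bc then (e, mem', true)
      else pvA_inner map2 bc rest (e + 1) mem'
    else pvA_inner map2 bc rest (e + 1) mem

-- A's `while True:` loop; fuel len1+1 is enough on Pre_ (begin grows every iteration)
def pvA_loop (l1 : List Char) (map2 : Int → Int) :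
    Nat → Nat → Int → (Int → Int) → List Int → List Int
  | 0, _, _, _, el => el
  | fuel + 1, b, e, mem, el =>
    match PySem.List.pyGet? l1 (b : Int) with
    | none => el   -- Python would raise IndexError here; unreachable on Pre_
    | some bc =>
      let bidx := pvIdx bc
      if map2 bidx > 0 then
        let mem' := pvUpd mem bidx (-1)
        if mem' bidx < map2 bidx then
          match pvA_inner map2 bc (l1.drop (e + 1).toNat) (e + 1) mem' with
          | (e', mem'', found) =>
            if found then pvA_loop l1 map2 fuel (b + 1) e' mem'' (el ++ [e'])
            else el   -- end == len1: break
        else pvA_loop l1 map2 fuel (b + 1) e mem' (el ++ [e])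
      else pvA_loop l1 map2 fuel (b + 1) e mem (el ++ [e])

def validSubstringCount (word1 : String) (word2 : String) : Int :=
  let l1 := word1.toList
  let l2 := word2.toList
  let map2 := pvCount26 l2
  let len1 : Int := l1.length
  let len2 : Int := l2.length
  if len1 < len2 then 0
  else
    let r := pvA_scan map2 len2 l1 0 (fun _ => 0) 0
    if r.2.1 ≠ len2 then 0
    else
      let el := pvA_loop l1 map2 (l1.length + 1) 0 r.2.2 r.1 [r.2.2]
      (el.length : Int) * len1 - el.sum

-- ===== PORT B =====
-- Source B's inner loop `for end in range(begin, n): …` over the suffix word1[begin:]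
def pvB_scan (need : Int → Int) (n : Int) :
    List Char → Int → (Int → Int) → Int → Int
  | [], _, _, _ => 0
  | c :: rest, e, hv, missing =>
    let i := pvIdx c
    let missing' := if hv i < need i then missing - 1 else missing
    let hv' := pvUpd hv i 1
    if missing' = 0 then n - e
    else pvB_scan need n rest (e + 1) hv' missing'

def validSubstringCount_alt (word1 : String) (word2 : String) : Int :=
  let l1 := word1.toList
  let l2 := word2.toList
  let need := pvCount26 l2
  let n : Int := l1.length
  let m : Int := l2.length
  if n < m then 0
  else
    (List.range l1.length).foldl
      (fun total b => total + pvB_scan need n (l1.drop b) (b : Int) (fun _ => 0) m) 0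

-- ===== PRECONDITION & SPEC =====
-- Pre_ excludes inputs on which Python A raises IndexError (empty word2; characters far from
-- 'a'..'z' in the part of the input A scans) and inputs on which A's returned value depends on
-- the accidental negative-index wraparound of its 26-entry lists (characters 'G'..'`').
def Pre_validSubstringCount (word1 : String) (word2 : String) : Prop :=
  word2.toList ≠ [] ∧
    word2.toList.all (fun c => 97 ≤ c.toNat && c.toNat ≤ 122) = true ∧
    (word1.toList.length < word2.toList.length ∨
      word1.toList.all (fun c => 97 ≤ c.toNat && c.toNat ≤ 122) = true)
instance (word1 : String) (word2 : String) : Decidable (Pre_validSubstringCount word1 word2) := by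
  unfold Pre_validSubstringCount; infer_instance

def pvWitness_validSubstringCount : String × String := ("bcca", "abc")

def Spec_validSubstringCount (word1 : String) (word2 : String) (out : Int) : Prop := out = validSubstringCount_alt word1 word2
instance (word1 : String) (word2 : String) (out : Int) : Decidable (Spec_validSubstringCount word1 word2 out) := by unfold Spec_validSubstringCount; infer_instance

-- ===== CLAIM (what is proved, stated in full; the proofs are below) =====
def Claim_equal_validSubstringCount : Prop := ∀ (word1 : String) (word2 : String), Dom_validSubstringCount word1 word2 → Pre_validSubstringCount word1 word2 → Spec_validSubstringCount word1 word2 (validSubstringCount word1 word2)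

-- ===== LEMMAS AND PROOFS =====

def pvCnt (cs : List Char) (j : Int) : Int := ((cs.countP (fun c => pvIdx c == j) : Nat) : Int)
def pvWinE (l : List Char) (b s : Nat) : List Char := (l.take s).drop b

lemma pvIdx_inj {c d : Char} (h : pvIdx c = pvIdx d) : c = d := by
  unfold pvIdx at h
  have : c.toNat = d.toNat := by omega
  exact Char.ext (UInt32.toNat_inj.mp this)

lemma pvUpd_self (f : Int → Int) (i d : Int) : pvUpd f i d i = f i + d := by
  simp [pvUpd]

lemma pvUpd_ne (f : Int → Int) {i j : Int} (d : Int) (h : j ≠ i) : pvUpd f i d j = f j := by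
  simp [pvUpd, h]

lemma pvCnt_nonneg (cs : List Char) (j : Int) : 0 ≤ pvCnt cs j := by
  unfold pvCnt; positivity

lemma pvCnt_nil (j : Int) : pvCnt [] j = 0 := rfl

lemma pvCnt_cons (c : Char) (cs : List Char) (j : Int) :
    pvCnt (c :: cs) j = (if pvIdx c = j then 1 else 0) + pvCnt cs j := by
  unfold pvCnt
  rw [List.countP_cons]
  by_cases h : pvIdx c = j
  · simp [h]; push_cast; ring
  · simp [h]

lemma pvCnt_append (xs ys : List Char) (j : Int) :
    pvCnt (xs ++ ys) j = pvCnt xs j + pvCnt ys j := by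
  unfold pvCnt; rw [List.countP_append]; push_cast; ring

lemma pvCnt_sublist {cs ds : List Char} (h : List.Sublist cs ds) (j : Int) :
    pvCnt cs j ≤ pvCnt ds j := by
  unfold pvCnt; exact_mod_cast h.countP_le (p := (fun c => pvIdx c == j))

lemma pvCnt_pos_iff (cs : List Char) (j : Int) :
    0 < pvCnt cs j ↔ ∃ c ∈ cs, pvIdx c = j := by
  unfold pvCnt
  rw [show (0:Int) < ((cs.countP (fun c => pvIdx c == j) : Nat) : Int) ↔
      0 < cs.countP (fun c => pvIdx c == j) from by exact_mod_cast Iff.rfl]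
  rw [List.countP_pos_iff]
  simp

lemma pvCount26_aux (l : List Char) (m0 : Int → Int) (j : Int) :
    (l.foldl (fun m c => pvUpd m (pvIdx c) 1) m0) j = m0 j + pvCnt l j := by
  induction l generalizing m0 with
  | nil => simp [pvCnt]
  | cons c cs ih =>
    simp only [List.foldl_cons]
    rw [ih, pvCnt_cons]
    by_cases h : j = pvIdx c
    · simp [pvUpd, h]; ring
    · have h2 : ¬ (pvIdx c = j) := fun hh => h hh.symm
      simp [pvUpd, h, h2]

lemma pvCount26_apply (l : List Char) (j : Int) : pvCount26 l j = pvCnt l j := by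
  unfold pvCount26; rw [pvCount26_aux]; omega

lemma pvWinE_nil (l : List Char) {b s : Nat} (h : s ≤ b) : pvWinE l b s = [] := by
  unfold pvWinE
  exact List.drop_eq_nil_of_le (le_trans (by simp) h)

lemma pvWinE_succ (l : List Char) {b s : Nat} (hb : b ≤ s) (hs : s < l.length) :
    pvWinE l b (s + 1) = pvWinE l b s ++ [l[s]] := by
  unfold pvWinE
  rw [List.take_add_one, List.getElem?_eq_getElem hs]
  rw [List.drop_append_of_le_length (by simp; omega)]
  rfl

lemma pvWinE_cons (l : List Char) {b s : Nat} (hb : b < s) (hbl : b < l.length) :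
    pvWinE l b s = l[b] :: pvWinE l (b + 1) s := by
  unfold pvWinE
  rw [List.drop_eq_getElem_cons (by simp; omega)]
  simp [List.getElem_take]

lemma pvWinE_split (l : List Char) {b m s : Nat} (h1 : b ≤ m) (h2 : m ≤ s) (h3 : m ≤ l.length) :
    pvWinE l b s = pvWinE l b m ++ pvWinE l m s := by
  unfold pvWinE
  have ht : l.take s = l.take m ++ (l.take s).drop m := by
    conv_lhs => rw [← List.take_append_drop m (l.take s)]
    rw [List.take_take, Nat.min_eq_left h2]
  conv_lhs => rw [ht]
  rw [List.drop_append_of_le_length (by simp; omega)]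

lemma pvWinE_sublist (l : List Char) {b b' s s' : Nat} (hb : b ≤ b') (hs : s' ≤ s) :
    List.Sublist (pvWinE l b' s') (pvWinE l b s) := by
  have h1 : pvWinE l b' s' = (pvWinE l b s').drop (b' - b) := by
    unfold pvWinE; rw [List.drop_drop]; congr 1; omega
  have h2 : List.Sublist (pvWinE l b s') (pvWinE l b s) := by
    unfold pvWinE
    have ht : l.take s' = (l.take s).take s' := by rw [List.take_take, Nat.min_eq_left hs]
    rw [ht]
    exact (List.take_sublist s' (l.take s)).drop b
  exact h1 ▸ (List.drop_sublist _ _).trans h2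

def pvCov (l1 l2 : List Char) (b e : Nat) : Prop :=
  ∀ j, pvCnt l2 j ≤ pvCnt (pvWinE l1 b (e + 1)) j
def pvCovB (l1 l2 : List Char) (b e : Nat) : Bool :=
  l2.all (fun c => pvCnt l2 (pvIdx c) ≤ pvCnt (pvWinE l1 b (e + 1)) (pvIdx c))
def pvSpecScan (l1 l2 : List Char) (b : Nat) (s : Nat) : Int :=
  if h : s < l1.length then
    (if pvCovB l1 l2 b s then (l1.length : Int) - s else pvSpecScan l1 l2 b (s + 1))
  else 0
termination_by l1.length - s
def pvTail (l1 l2 : List Char) (b : Nat) : Int :=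
  if h : b < l1.length then pvSpecScan l1 l2 b b + pvTail l1 l2 (b + 1) else 0
termination_by l1.length - b
def pvJ (l2 : List Char) : Finset Int := (l2.map pvIdx).toFinset
def pvMatched (l2 : List Char) (hv : Int → Int) : Int :=
  ∑ j ∈ pvJ l2, min (hv j) (pvCnt l2 j)

lemma pvCovB_iff (l1 l2 : List Char) (b e : Nat) :
    pvCovB l1 l2 b e = true ↔ pvCov l1 l2 b e := by
  unfold pvCovB pvCov
  rw [List.all_eq_true]
  constructor
  · intro h j
    by_cases hj : 0 < pvCnt l2 j
    · obtain ⟨c, hc, rfl⟩ := (pvCnt_pos_iff l2 j).mp hj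
      simpa using h c hc
    · exact le_trans (by omega) (pvCnt_nonneg _ _)
  · intro h c _
    simpa using h (pvIdx c)

lemma pvCov_mono (l1 l2 : List Char) {b b' e e' : Nat} (hb : b ≤ b') (he : e' ≤ e)
    (h : pvCov l1 l2 b' e') : pvCov l1 l2 b e := by
  intro j
  exact le_trans (h j) (pvCnt_sublist (pvWinE_sublist l1 hb (by omega)) j)

lemma pvCov_le (l1 l2 : List Char) {b e : Nat} (hl2 : l2 ≠ []) (h : pvCov l1 l2 b e) :
    b ≤ e := by
  by_contra hbe
  obtain ⟨c, hc⟩ : ∃ c, c ∈ l2 := List.exists_mem_of_ne_nil l2 hl2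
  have h1 : 0 < pvCnt l2 (pvIdx c) := (pvCnt_pos_iff _ _).mpr ⟨c, hc, rfl⟩
  have h2 := h (pvIdx c)
  rw [pvWinE_nil l1 (by omega), pvCnt_nil] at h2
  omega

lemma pvSpecScan_first (l1 l2 : List Char) (b : Nat) {s e0 : Nat}
    (hs : s ≤ e0) (he : e0 < l1.length) (hcov : pvCov l1 l2 b e0)
    (hmin : ∀ e, s ≤ e → e < e0 → ¬ pvCov l1 l2 b e) :
    pvSpecScan l1 l2 b s = (l1.length : Int) - e0 := by
  induction hd : e0 - s generalizing s with
  | zero =>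
    have : s = e0 := by omega
    subst this
    rw [pvSpecScan]
    simp [he, (pvCovB_iff l1 l2 b s).mpr hcov]
  | succ k ih =>
    rw [pvSpecScan]
    have hsl : s < l1.length := by omega
    have hnc : ¬ pvCovB l1 l2 b s = true := by
      rw [pvCovB_iff]; exact hmin s le_rfl (by omega)
    rw [dif_pos hsl, if_neg (by simpa using hnc)]
    exact ih (by omega) (fun e h1 h2 => hmin e (by omega) h2) (by omega)

lemma pvSpecScan_zero (l1 l2 : List Char) (b : Nat) {s : Nat}
    (h : ∀ e, s ≤ e → e < l1.length → ¬ pvCov l1 l2 b e) :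
    pvSpecScan l1 l2 b s = 0 := by
  induction hd : l1.length - s generalizing s with
  | zero =>
    rw [pvSpecScan]; simp; omega
  | succ k ih =>
    rw [pvSpecScan]
    have hsl : s < l1.length := by omega
    have hnc : ¬ pvCovB l1 l2 b s = true := by
      rw [pvCovB_iff]; exact h s le_rfl hsl
    rw [dif_pos hsl, if_neg (by simpa using hnc)]
    exact ih (fun e h1 h2 => h e (by omega) h2) (by omega)

lemma pvTail_zero (l1 l2 : List Char) {b : Nat}
    (h : ∀ b', b ≤ b' → pvSpecScan l1 l2 b' b' = 0) : pvTail l1 l2 b = 0 := by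
  induction hd : l1.length - b generalizing b with
  | zero => rw [pvTail]; simp; omega
  | succ k ih =>
    rw [pvTail]
    by_cases hb : b < l1.length
    · rw [dif_pos hb, h b le_rfl, ih (fun b' hb' => h b' (by omega)) (by omega)]; ring
    · simp [hb]

lemma pvTail_succ (l1 l2 : List Char) {b : Nat} (h : b < l1.length) :
    pvTail l1 l2 b = pvSpecScan l1 l2 b b + pvTail l1 l2 (b + 1) := by
  rw [pvTail]; simp [h]

lemma mem_pvJ (l2 : List Char) (j : Int) : j ∈ pvJ l2 ↔ 0 < pvCnt l2 j := by
  rw [pvCnt_pos_iff]; unfold pvJ; simp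

lemma pvLen_eq_sum (l2 : List Char) : ((l2.length : Nat) : Int) = ∑ j ∈ pvJ l2, pvCnt l2 j := by
  have h1 : ∀ j : Int, pvCnt l2 j = ((l2.map pvIdx).count j : Int) := by
    intro j
    unfold pvCnt
    congr 1
    rw [List.count_eq_countP, List.countP_map]
    rfl
  calc ((l2.length : Nat) : Int) = (((l2.map pvIdx).length : Nat) : Int) := by simp
    _ = ((∑ j ∈ (l2.map pvIdx).toFinset, (l2.map pvIdx).count j : Nat) : Int) := by
          rw [List.sum_toFinset_count_eq_length]
    _ = ∑ j ∈ pvJ l2, pvCnt l2 j := by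
          push_cast
          exact Finset.sum_congr rfl (fun j _ => (h1 j).symm)

lemma pvMatched_upd (l2 : List Char) (hv : Int → Int) (i : Int) (hnn : 0 ≤ hv i) :
    pvMatched l2 (pvUpd hv i 1) =
      pvMatched l2 hv + (if hv i < pvCnt l2 i then 1 else 0) := by
  unfold pvMatched
  by_cases hi : i ∈ pvJ l2
  · rw [← Finset.sum_erase_add _ _ hi, ← Finset.sum_erase_add _ _ hi]
    have h1 : ∀ j ∈ (pvJ l2).erase i, min (pvUpd hv i 1 j) (pvCnt l2 j) = min (hv j) (pvCnt l2 j) := by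
      intro j hj
      rw [pvUpd_ne hv 1 (Finset.ne_of_mem_erase hj)]
    rw [Finset.sum_congr rfl h1, pvUpd_self]
    have h2 : 0 < pvCnt l2 i := (mem_pvJ l2 i).mp hi
    by_cases h3 : hv i < pvCnt l2 i
    · rw [if_pos h3]; omega
    · rw [if_neg h3]; omega
  · have h1 : ∀ j ∈ pvJ l2, min (pvUpd hv i 1 j) (pvCnt l2 j) = min (hv j) (pvCnt l2 j) := by
      intro j hj
      rw [pvUpd_ne hv 1 (fun hji => hi (by rw [← hji]; exact hj))]
    rw [Finset.sum_congr rfl h1]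
    have h2 : ¬ 0 < pvCnt l2 i := fun hp => hi ((mem_pvJ l2 i).mpr hp)
    rw [if_neg (by omega)]
    omega

lemma pvMatched_eq_iff (l2 : List Char) (hv : Int → Int) (hnn : ∀ j, 0 ≤ hv j) :
    pvMatched l2 hv = (l2.length : Int) ↔ ∀ j, pvCnt l2 j ≤ hv j := by
  constructor
  · intro h j
    by_cases hj : j ∈ pvJ l2
    · by_contra hlt
      have hstrict : ∑ j ∈ pvJ l2, min (hv j) (pvCnt l2 j) < ∑ j ∈ pvJ l2, pvCnt l2 j := by
        apply Finset.sum_lt_sum (fun k _ => min_le_right _ _)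
        exact ⟨j, hj, by omega⟩
      rw [pvLen_eq_sum] at h
      unfold pvMatched at h
      omega
    · have : ¬ 0 < pvCnt l2 j := fun hp => hj ((mem_pvJ l2 j).mpr hp)
      have := hnn j
      omega
  · intro h
    rw [pvLen_eq_sum]
    unfold pvMatched
    exact Finset.sum_congr rfl (fun j _ => by have := h j; omega)

lemma pvWinE_mem (l : List Char) {a s : Nat} {x : Char} (h : x ∈ pvWinE l a s) :
    ∃ u, a ≤ u ∧ u < s ∧ u < l.length ∧ l[u]? = some x := by
  unfold pvWinE at h
  obtain ⟨k, hk, hx⟩ := List.getElem_of_mem h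
  have hlen : ((l.take s).drop a).length = min s l.length - a := by simp
  refine ⟨a + k, by omega, by omega, by omega, ?_⟩
  · rw [List.getElem_drop, List.getElem_take] at hx
    rw [List.getElem?_eq_getElem (by omega)]
    rw [← hx]

-- matched only depends on values on pvJ
lemma pvMatched_congr (l2 : List Char) {f g : Int → Int}
    (h : ∀ j, 0 < pvCnt l2 j → f j = g j) : pvMatched l2 f = pvMatched l2 g := by
  unfold pvMatched
  exact Finset.sum_congr rfl (fun j hj => by rw [h j ((mem_pvJ l2 j).mp hj)])

lemma pvMatched_zero (l2 : List Char) : pvMatched l2 (fun _ => 0) = 0 := by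
  unfold pvMatched
  rw [Finset.sum_congr rfl (fun j _ => by simp [min_eq_left (pvCnt_nonneg l2 j)] : ∀ j ∈ pvJ l2, min 0 (pvCnt l2 j) = 0)]
  simp

lemma pvB_scan_spec (l1 l2 : List Char) (need : Int → Int)
    (hneed : ∀ j, need j = pvCnt l2 j) (b : Nat) :
    ∀ s (hv : Int → Int) (missing : Int), b ≤ s → s ≤ l1.length →
      (∀ j, hv j = pvCnt (pvWinE l1 b s) j) →
      missing = (l2.length : Int) - pvMatched l2 hv →
      missing ≠ 0 →
      pvB_scan need (l1.length : Int) (l1.drop s) (s : Int) hv missing =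
        pvSpecScan l1 l2 b s := by
  intro s
  induction hd : l1.length - s generalizing s with
  | zero =>
    intro hv missing hb hs hhv hmiss hne
    have hs' : s = l1.length := by omega
    subst hs'
    rw [List.drop_length]
    rw [pvB_scan, pvSpecScan]
    simp
  | succ k ih =>
    intro hv missing hb hs hhv hmiss hne
    have hsl : s < l1.length := by omega
    rw [List.drop_eq_getElem_cons hsl, pvB_scan]
    set c := l1[s] with hc
    set i := pvIdx c with hi
    have hvnn : ∀ j, 0 ≤ hv j := fun j => (hhv j) ▸ pvCnt_nonneg _ _
    have hwin : ∀ j, pvCnt (pvWinE l1 b (s+1)) j = pvUpd hv i 1 j := by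
      intro j
      rw [pvWinE_succ l1 hb hsl, pvCnt_append, pvCnt_cons, pvCnt_nil]
      by_cases hji : j = i
      · rw [hji, pvUpd_self, hhv, hi, hc]; simp
      · rw [pvUpd_ne hv 1 hji, hhv]
        have h3 : ¬ (pvIdx c = j) := fun hh => hji (by rw [← hh, hi])
        rw [← hc]
        simp [h3]
    have hm' : pvMatched l2 (pvUpd hv i 1) = pvMatched l2 hv + (if hv i < need i then 1 else 0) := by
      rw [pvMatched_upd l2 hv i (hvnn i), hneed]
    have hcovIff : ((if hv i < need i then missing - 1 else missing) = 0) ↔ pvCovB l1 l2 b s = true := by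
      rw [pvCovB_iff]
      unfold pvCov
      have e1 : (if hv i < need i then missing - 1 else missing) = (l2.length : Int) - pvMatched l2 (pvUpd hv i 1) := by
        rw [hm', hmiss]; by_cases hh : hv i < need i <;> simp [hh] <;> ring
      rw [e1]
      have e2 : ∀ j, pvCnt (pvWinE l1 b (s+1)) j = pvUpd hv i 1 j := hwin
      constructor
      · intro hz j
        have := (pvMatched_eq_iff l2 (pvUpd hv i 1) (fun j => by
            rw [← e2 j]; exact pvCnt_nonneg _ _)).mp (by omega)
        rw [e2]; exact this j
      · intro hcv
        have := (pvMatched_eq_iff l2 (pvUpd hv i 1) (fun j => by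
            rw [← e2 j]; exact pvCnt_nonneg _ _)).mpr (fun j => by rw [← e2 j]; exact hcv j)
        omega
    rw [pvSpecScan, dif_pos hsl]
    by_cases hcov : pvCovB l1 l2 b s = true
    · rw [if_pos (hcovIff.mpr hcov), if_pos hcov]
    · rw [if_neg (fun hz => hcov (hcovIff.mp hz)), if_neg hcov]
      have : ((s:Int) + 1) = ((s+1 : Nat) : Int) := by push_cast; ring
      rw [this]
      apply ih (s+1) (by omega) (pvUpd hv i 1) _ (by omega) (by omega) (fun j => (hwin j).symm)
      · rw [hm', hmiss]; by_cases hh : hv i < need i <;> simp [hh] <;> ring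
      · intro hz; exact hcov (hcovIff.mp hz)

lemma pvA_scan_cons_pos (map2 : Int → Int) (len2 : Int) (c : Char) (rest : List Char)
    (i : Int) (mem : Int → Int) (mtch : Int) (h : map2 (pvIdx c) > 0) :
    pvA_scan map2 len2 (c :: rest) i mem mtch =
      (if (if (pvUpd mem (pvIdx c) 1) (pvIdx c) ≤ map2 (pvIdx c) then mtch + 1 else mtch) = len2
       then (pvUpd mem (pvIdx c) 1,
             (if (pvUpd mem (pvIdx c) 1) (pvIdx c) ≤ map2 (pvIdx c) then mtch + 1 else mtch), i)
       else pvA_scan map2 len2 rest (i + 1) (pvUpd mem (pvIdx c) 1)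
              (if (pvUpd mem (pvIdx c) 1) (pvIdx c) ≤ map2 (pvIdx c) then mtch + 1 else mtch)) := by
  rw [pvA_scan]
  simp only [h, if_true]

lemma pvA_scan_cons_neg (map2 : Int → Int) (len2 : Int) (c : Char) (rest : List Char)
    (i : Int) (mem : Int → Int) (mtch : Int) (h : ¬ map2 (pvIdx c) > 0) :
    pvA_scan map2 len2 (c :: rest) i mem mtch =
      (if mtch = len2 then (mem, mtch, i)
       else pvA_scan map2 len2 rest (i + 1) mem mtch) := by
  rw [pvA_scan]
  simp only [h, if_false]

lemma pvA_scan_spec (l1 l2 : List Char) (map2 : Int → Int)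
    (hmap : ∀ j, map2 j = pvCnt l2 j) (hl2 : l2 ≠ []) :
    ∀ s (mem : Int → Int) (mtch : Int), s ≤ l1.length →
      (∀ j, mem j = if 0 < pvCnt l2 j then pvCnt (pvWinE l1 0 s) j else 0) →
      mtch = pvMatched l2 (fun j => pvCnt (pvWinE l1 0 s) j) →
      (∀ e, e < s → ¬ pvCov l1 l2 0 e) →
      (∃ e0, s ≤ e0 ∧ e0 < l1.length ∧ pvCov l1 l2 0 e0 ∧
          (∀ e, e < e0 → ¬ pvCov l1 l2 0 e) ∧
          (pvA_scan map2 (l2.length : Int) (l1.drop s) (s : Int) mem mtch).2.2 = (e0 : Int) ∧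
          (pvA_scan map2 (l2.length : Int) (l1.drop s) (s : Int) mem mtch).2.1 = (l2.length : Int) ∧
          (∀ j, (pvA_scan map2 (l2.length : Int) (l1.drop s) (s : Int) mem mtch).1 j =
              if 0 < pvCnt l2 j then pvCnt (pvWinE l1 0 (e0 + 1)) j else 0)) ∨
      ((∀ e, e < l1.length → ¬ pvCov l1 l2 0 e) ∧
        (pvA_scan map2 (l2.length : Int) (l1.drop s) (s : Int) mem mtch).2.1 ≠ (l2.length : Int)) := by
  intro s
  induction hd : l1.length - s generalizing s with
  | zero =>
    intro mem mtch hs hmem hmtch hmin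
    have hs' : s = l1.length := by omega
    subst hs'
    rw [List.drop_length]
    right
    refine ⟨fun e he => hmin e he, ?_⟩
    show mtch ≠ (l2.length : Int)
    intro heq
    have hnn : ∀ j, 0 ≤ pvCnt (pvWinE l1 0 l1.length) j := fun j => pvCnt_nonneg _ _
    have hcv := (pvMatched_eq_iff l2 (fun j => pvCnt (pvWinE l1 0 l1.length) j) hnn).mp
      (by rw [← hmtch]; exact heq)
    -- coverage at the full window means some e < length covers, or l1 is empty
    rcases Nat.eq_zero_or_pos l1.length with h0 | h0
    · obtain ⟨c, hc⟩ := List.exists_mem_of_ne_nil l2 hl2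
      have h1 : 0 < pvCnt l2 (pvIdx c) := (pvCnt_pos_iff _ _).mpr ⟨c, hc, rfl⟩
      have h2 := hcv (pvIdx c)
      rw [pvWinE_nil l1 (by omega), pvCnt_nil] at h2
      omega
    · exact hmin (l1.length - 1) (by omega)
        (fun j => by
          have := hcv j
          have he : l1.length - 1 + 1 = l1.length := by omega
          rw [he]
          exact this)
  | succ k ih =>
    intro mem mtch hs hmem hmtch hmin
    have hsl : s < l1.length := by omega
    rw [List.drop_eq_getElem_cons hsl]
    set c := l1[s] with hc
    have hwinstep : ∀ j, pvCnt (pvWinE l1 0 (s+1)) j =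
        pvCnt (pvWinE l1 0 s) j + (if pvIdx c = j then 1 else 0) := by
      intro j
      rw [pvWinE_succ l1 (Nat.zero_le s) hsl, pvCnt_append, pvCnt_cons, pvCnt_nil, ← hc]
      ring
    have hcovS : ∀ mt, mt = pvMatched l2 (fun j => pvCnt (pvWinE l1 0 (s+1)) j) →
        (mt = (l2.length : Int) ↔ pvCov l1 l2 0 s) := by
      intro mt hmt
      rw [hmt]
      exact pvMatched_eq_iff l2 _ (fun j => pvCnt_nonneg _ _)
    by_cases hneed : map2 (pvIdx c) > 0
    · -- needed character
      have hneedc : 0 < pvCnt l2 (pvIdx c) := by rw [← hmap]; exact hneed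
      have hmm : mem (pvIdx c) = pvCnt (pvWinE l1 0 s) (pvIdx c) := by
        rw [hmem, if_pos hneedc]
      have e1 : (fun j => pvCnt (pvWinE l1 0 (s+1)) j) =
          pvUpd (fun j => pvCnt (pvWinE l1 0 s) j) (pvIdx c) 1 := by
        funext j
        rw [hwinstep]
        by_cases hji : j = pvIdx c
        · rw [hji, pvUpd_self]; simp
        · rw [pvUpd_ne _ 1 hji]
          have h3 : ¬ (pvIdx c = j) := fun hh => hji hh.symm
          simp [h3]
      have hm2 : (if (pvUpd mem (pvIdx c) 1) (pvIdx c) ≤ map2 (pvIdx c) then mtch + 1 else mtch)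
          = pvMatched l2 (fun j => pvCnt (pvWinE l1 0 (s+1)) j) := by
        rw [e1, pvMatched_upd l2 _ _ (pvCnt_nonneg _ _), ← hmtch]
        rw [pvUpd_self, hmm, hmap]
        by_cases hlt : pvCnt (pvWinE l1 0 s) (pvIdx c) < pvCnt l2 (pvIdx c)
        · rw [if_pos (by omega), if_pos hlt]
        · rw [if_neg (by omega), if_neg hlt]; ring
      have hmemnew : ∀ j, (pvUpd mem (pvIdx c) 1) j =
          if 0 < pvCnt l2 j then pvCnt (pvWinE l1 0 (s+1)) j else 0 := by
        intro j
        by_cases hji : j = pvIdx c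
        · rw [hji, pvUpd_self, hmm, if_pos hneedc, hwinstep]; simp
        · rw [pvUpd_ne _ 1 hji, hmem, hwinstep]
          have h3 : ¬ (pvIdx c = j) := fun hh => hji hh.symm
          simp [h3]
      rw [pvA_scan_cons_pos map2 _ c _ _ mem mtch hneed]
      by_cases hbr : (if (pvUpd mem (pvIdx c) 1) (pvIdx c) ≤ map2 (pvIdx c) then mtch + 1 else mtch) = (l2.length : Int)
      · rw [if_pos hbr]
        left
        refine ⟨s, le_rfl, hsl, (hcovS _ hm2).mp hbr, hmin, rfl, hbr, hmemnew⟩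
      · rw [if_neg hbr]
        have hmin' : ∀ e, e < s + 1 → ¬ pvCov l1 l2 0 e := by
          intro e he
          rcases Nat.lt_succ_iff_lt_or_eq.mp he with h1 | h1
          · exact hmin e h1
          · subst h1; intro hcv; exact hbr ((hcovS _ hm2).mpr hcv)
        have hcast : (s : Int) + 1 = ((s + 1 : Nat) : Int) := by push_cast; ring
        rw [hcast]
        rcases ih (s+1) (by omega) _ _ (by omega) hmemnew hm2 hmin' with ⟨e0, he0, hrest⟩ | hr
        · exact Or.inl ⟨e0, by omega, hrest⟩
        · exact Or.inr hr
    · -- unneeded character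
      have hneedc : pvCnt l2 (pvIdx c) = 0 := by
        have h0 := pvCnt_nonneg l2 (pvIdx c)
        rw [← hmap] at h0 ⊢
        omega
      have hmemnew : ∀ j, mem j = if 0 < pvCnt l2 j then pvCnt (pvWinE l1 0 (s+1)) j else 0 := by
        intro j
        rw [hmem, hwinstep]
        by_cases hj : 0 < pvCnt l2 j
        · rw [if_pos hj, if_pos hj]
          have h3 : ¬ (pvIdx c = j) := by
            intro hh; rw [hh] at hneedc; omega
          simp [h3]
        · rw [if_neg hj, if_neg hj]
      have hm2 : mtch = pvMatched l2 (fun j => pvCnt (pvWinE l1 0 (s+1)) j) := by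
        rw [hmtch]
        apply pvMatched_congr
        intro j hj
        rw [hwinstep]
        have h3 : ¬ (pvIdx c = j) := by
          intro hh; rw [hh] at hneedc; omega
        simp [h3]
      rw [pvA_scan_cons_neg map2 _ c _ _ mem mtch hneed]
      by_cases hbr : mtch = (l2.length : Int)
      · rw [if_pos hbr]
        left
        refine ⟨s, le_rfl, hsl, (hcovS _ hm2).mp hbr, hmin, rfl, hbr, hmemnew⟩
      · rw [if_neg hbr]
        have hmin' : ∀ e, e < s + 1 → ¬ pvCov l1 l2 0 e := by
          intro e he
          rcases Nat.lt_succ_iff_lt_or_eq.mp he with h1 | h1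
          · exact hmin e h1
          · subst h1; intro hcv; exact hbr ((hcovS _ hm2).mpr hcv)
        have hcast : (s : Int) + 1 = ((s + 1 : Nat) : Int) := by push_cast; ring
        rw [hcast]
        rcases ih (s+1) (by omega) _ _ (by omega) hmemnew hm2 hmin' with ⟨e0, he0, hrest⟩ | hr
        · exact Or.inl ⟨e0, by omega, hrest⟩
        · exact Or.inr hr

lemma pvA_inner_notfound (l1 : List Char) (map2 : Int → Int) (bc : Char) :
    ∀ s (mem : Int → Int), (∀ u, s ≤ u → u < l1.length → l1[u]? ≠ some bc) →
      (pvA_inner map2 bc (l1.drop s) (s : Int) mem).2.2 = false := by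
  intro s
  induction hd : l1.length - s generalizing s with
  | zero =>
    intro mem hno
    have : l1.length ≤ s := by omega
    rw [List.drop_eq_nil_of_le this, pvA_inner]
  | succ k ih =>
    intro mem hno
    have hsl : s < l1.length := by omega
    rw [List.drop_eq_getElem_cons hsl, pvA_inner]
    have hne : ¬ (l1[s] = bc) := by
      intro hh
      exact hno s le_rfl hsl (by rw [List.getElem?_eq_getElem hsl, hh])
    have hcast : (s : Int) + 1 = ((s + 1 : Nat) : Int) := by push_cast; ring
    by_cases hneed : map2 (pvIdx l1[s]) > 0
    · rw [if_pos hneed, if_neg hne, hcast]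
      exact ih (s+1) (by omega) _ (fun u hu hul => hno u (by omega) hul)
    · rw [if_neg hneed, hcast]
      exact ih (s+1) (by omega) _ (fun u hu hul => hno u (by omega) hul)

lemma pvA_inner_found (l1 l2 : List Char) (map2 : Int → Int)
    (hmap : ∀ j, map2 j = pvCnt l2 j) (bc : Char) (hbc : 0 < pvCnt l2 (pvIdx bc)) :
    ∀ s (mem : Int → Int) (t : Nat), s ≤ t → t < l1.length → l1[t]? = some bc →
      (∀ u, s ≤ u → u < t → l1[u]? ≠ some bc) →
      (pvA_inner map2 bc (l1.drop s) (s : Int) mem).1 = (t : Int) ∧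
      (pvA_inner map2 bc (l1.drop s) (s : Int) mem).2.2 = true ∧
      (∀ j, (pvA_inner map2 bc (l1.drop s) (s : Int) mem).2.1 j =
        mem j + (if 0 < pvCnt l2 j then pvCnt (pvWinE l1 s (t + 1)) j else 0)) := by
  intro s
  induction hd : l1.length - s generalizing s with
  | zero => intro mem t hst htl; omega
  | succ k ih =>
    intro mem t hst htl hget hno
    have hsl : s < l1.length := by omega
    rw [List.drop_eq_getElem_cons hsl]
    rcases Nat.eq_or_lt_of_le hst with heq | hlt
    · -- s = t : the breaking position
      subst heq
      have hcbc : l1[s] = bc := by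
        rw [List.getElem?_eq_getElem hsl] at hget
        exact Option.some_injective _ hget
      have hneed : map2 (pvIdx l1[s]) > 0 := by rw [hcbc, hmap]; exact hbc
      rw [pvA_inner, if_pos hneed, if_pos hcbc]
      refine ⟨rfl, rfl, ?_⟩
      intro j
      show pvUpd mem (pvIdx l1[s]) 1 j = _
      have hwin : pvCnt (pvWinE l1 s (s + 1)) j = (if pvIdx bc = j then 1 else 0) := by
        rw [pvWinE_succ l1 le_rfl hsl, pvWinE_nil l1 le_rfl]
        rw [List.nil_append, pvCnt_cons, pvCnt_nil, hcbc]
        ring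
      by_cases hji : j = pvIdx l1[s]
      · subst hji
        rw [pvUpd_self]
        rw [hcbc] at hwin ⊢
        rw [if_pos hbc, hwin, if_pos rfl]
      · rw [pvUpd_ne _ 1 hji, hwin]
        have h3 : ¬ (pvIdx bc = j) := fun hh => hji (by rw [← hh, hcbc])
        rw [if_neg h3]
        by_cases hj : 0 < pvCnt l2 j <;> simp [hj]
    · -- s < t : keep scanning
      have hne : ¬ (l1[s] = bc) := by
        intro hh
        exact hno s le_rfl hlt (by rw [List.getElem?_eq_getElem hsl, hh])
      have hcast : (s : Int) + 1 = ((s + 1 : Nat) : Int) := by push_cast; ring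
      have hwinstep : ∀ j, pvCnt (pvWinE l1 s (t + 1)) j =
          (if pvIdx l1[s] = j then 1 else 0) + pvCnt (pvWinE l1 (s + 1) (t + 1)) j := by
        intro j
        rw [pvWinE_cons l1 (by omega) hsl, pvCnt_cons]
      rw [pvA_inner]
      by_cases hneed : map2 (pvIdx l1[s]) > 0
      · rw [if_pos hneed, if_neg hne, hcast]
        obtain ⟨r1, r2, r3⟩ := ih (s+1) (by omega) (pvUpd mem (pvIdx l1[s]) 1) t (by omega) htl hget
          (fun u hu hut => hno u (by omega) hut)
        refine ⟨r1, r2, ?_⟩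
        intro j
        rw [r3 j, hwinstep]
        have hneedc : 0 < pvCnt l2 (pvIdx l1[s]) := by rw [← hmap]; exact hneed
        by_cases hji : j = pvIdx l1[s]
        · rw [hji, pvUpd_self, if_pos hneedc, if_pos hneedc, if_pos rfl]
          ring
        · have h3 : ¬ (pvIdx l1[s] = j) := fun hh => hji hh.symm
          rw [pvUpd_ne _ 1 hji, if_neg h3]
          by_cases hj : 0 < pvCnt l2 j <;> simp [hj]
      · rw [if_neg hneed, hcast]
        obtain ⟨r1, r2, r3⟩ := ih (s+1) (by omega) mem t (by omega) htl hget
          (fun u hu hut => hno u (by omega) hut)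
        refine ⟨r1, r2, ?_⟩
        intro j
        rw [r3 j, hwinstep]
        have hneedc : pvCnt l2 (pvIdx l1[s]) = 0 := by
          have h0 := pvCnt_nonneg l2 (pvIdx l1[s])
          rw [← hmap] at h0 ⊢
          omega
        by_cases hj : 0 < pvCnt l2 j
        · rw [if_pos hj, if_pos hj]
          have h3 : ¬ (pvIdx l1[s] = j) := by
            intro hh; rw [hh] at hneedc; omega
          rw [if_neg h3]
          ring
        · rw [if_neg hj, if_neg hj]

lemma pvCnt_win_zero (l1 : List Char) (bc : Char) {a s : Nat}
    (h : ∀ u, a ≤ u → u < s → u < l1.length → l1[u]? ≠ some bc) :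
    pvCnt (pvWinE l1 a s) (pvIdx bc) = 0 := by
  have hnn := pvCnt_nonneg (pvWinE l1 a s) (pvIdx bc)
  by_contra hne
  have hpos : 0 < pvCnt (pvWinE l1 a s) (pvIdx bc) := by omega
  obtain ⟨c, hcmem, hcidx⟩ := (pvCnt_pos_iff _ _).mp hpos
  have hcbc : c = bc := pvIdx_inj hcidx
  subst hcbc
  obtain ⟨u, hu1, hu2, hu3, hu4⟩ := pvWinE_mem l1 hcmem
  exact h u hu1 hu2 hu3 hu4

lemma pvA_loop_succ (l1 : List Char) (map2 : Int → Int) (fuel : Nat) (b : Nat) (e : Int)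
    (mem : Int → Int) (el : List Int) (hb : b < l1.length) :
    pvA_loop l1 map2 (fuel + 1) b e mem el =
      (if map2 (pvIdx l1[b]) > 0 then
        if pvUpd mem (pvIdx l1[b]) (-1) (pvIdx l1[b]) < map2 (pvIdx l1[b]) then
          (match pvA_inner map2 l1[b] (l1.drop (e + 1).toNat) (e + 1) (pvUpd mem (pvIdx l1[b]) (-1)) with
           | (e', mem'', found) =>
             if found then pvA_loop l1 map2 fuel (b + 1) e' mem'' (el ++ [e']) else el)
        else pvA_loop l1 map2 fuel (b + 1) e (pvUpd mem (pvIdx l1[b]) (-1)) (el ++ [e])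
      else pvA_loop l1 map2 fuel (b + 1) e mem (el ++ [e])) := by
  rw [pvA_loop]
  rw [show PySem.List.pyGet? l1 (b : Int) = some l1[b] from by
    rw [PySem.List.pyGet?_natCast, List.getElem?_eq_getElem hb]]

lemma pvA_loop_spec (l1 l2 : List Char) (map2 : Int → Int)
    (hmap : ∀ j, map2 j = pvCnt l2 j) (hl2 : l2 ≠ []) :
    ∀ fuel b eN (mem : Int → Int) (el : List Int),
      b ≤ eN → eN < l1.length →
      pvCov l1 l2 b eN → (∀ e, e < eN → ¬ pvCov l1 l2 b e) →
      (∀ j, mem j = if 0 < pvCnt l2 j then pvCnt (pvWinE l1 b (eN + 1)) j else 0) →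
      l1.length ≤ b + fuel →
      ((pvA_loop l1 map2 fuel b (eN : Int) mem el).length : Int) * l1.length
          - (pvA_loop l1 map2 fuel b (eN : Int) mem el).sum
        = ((el.length : Int) * l1.length - el.sum) + pvTail l1 l2 (b + 1) := by
  intro fuel
  induction fuel with
  | zero =>
    intro b eN mem el hb he hcov hmin hmem hfuel
    omega
  | succ fuel ih =>
    intro b eN mem el hb he hcov hmin hmem hfuel
    have hbl : b < l1.length := by omega
    rw [pvA_loop_succ l1 map2 fuel b (eN : Int) mem el hbl]
    set bc := l1[b] with hbc
    set j0 := pvIdx bc with hj0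
    -- window decomposition at the left edge
    have hcons : ∀ j, pvCnt (pvWinE l1 (b + 1) (eN + 1)) j =
        pvCnt (pvWinE l1 b (eN + 1)) j - (if j0 = j then 1 else 0) := by
      intro j
      rw [pvWinE_cons l1 (by omega) hbl, pvCnt_cons, ← hbc, ← hj0]
      ring
    -- valSum of el ++ [x]
    have hval : ∀ (x : Int),
        (((el ++ [x]).length : Int) * l1.length - (el ++ [x]).sum)
          = ((el.length : Int) * l1.length - el.sum) + ((l1.length : Int) - x) := by
      intro x
      rw [List.length_append, List.sum_append]
      push_cast
      simp
      ring
    -- generic continue-step: new state is (b+1, eN) with Cov (b+1) eN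
    have hstep : ∀ (mem2 : Int → Int),
        pvCov l1 l2 (b + 1) eN →
        (∀ j, mem2 j = if 0 < pvCnt l2 j then pvCnt (pvWinE l1 (b + 1) (eN + 1)) j else 0) →
        ((pvA_loop l1 map2 fuel (b + 1) (eN : Int) mem2 (el ++ [(eN : Int)])).length : Int) * l1.length
            - (pvA_loop l1 map2 fuel (b + 1) (eN : Int) mem2 (el ++ [(eN : Int)])).sum
          = ((el.length : Int) * l1.length - el.sum) + pvTail l1 l2 (b + 1) := by
      intro mem2 hcov' hmem2
      have hble : b + 1 ≤ eN := pvCov_le l1 l2 hl2 hcov'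
      have hmin' : ∀ e, e < eN → ¬ pvCov l1 l2 (b + 1) e := by
        intro e hee hcv
        exact hmin e hee (pvCov_mono l1 l2 (by omega) le_rfl hcv)
      rw [ih (b + 1) eN mem2 (el ++ [(eN : Int)]) hble he hcov' hmin' hmem2 (by omega)]
      rw [hval]
      rw [pvTail_succ l1 l2 (by omega : b + 1 < l1.length)]
      rw [pvSpecScan_first l1 l2 (b + 1) hble he hcov' (fun e _ h2 => hmin' e h2)]
      ring
    by_cases hneed : map2 j0 > 0
    · have hneedc : 0 < pvCnt l2 j0 := by rw [← hmap]; exact hneed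
      have hmemj0 : mem j0 = pvCnt (pvWinE l1 b (eN + 1)) j0 := by
        rw [hmem, if_pos hneedc]
      rw [if_pos hneed]
      by_cases hdef : pvUpd mem j0 (-1) j0 < map2 j0
      · -- deficit: the removed character was critical
        rw [if_pos hdef]
        rw [pvUpd_self, hmemj0, hmap] at hdef
        have hexact : pvCnt (pvWinE l1 b (eN + 1)) j0 = pvCnt l2 j0 := by
          have := hcov j0
          omega
        have hmem' : ∀ j, pvUpd mem j0 (-1) j =
            if 0 < pvCnt l2 j then pvCnt (pvWinE l1 (b + 1) (eN + 1)) j else 0 := by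
          intro j
          by_cases hji : j = j0
          · rw [hji, pvUpd_self, hmemj0, if_pos hneedc, hcons, if_pos rfl]
            ring
          · have h3 : ¬ (j0 = j) := fun hh => hji hh.symm
            rw [pvUpd_ne _ _ hji, hmem, hcons, if_neg h3]
            by_cases hj : 0 < pvCnt l2 j <;> simp [hj]
        have hcast1 : ((eN : Int) + 1).toNat = eN + 1 := by omega
        have hcast2 : (eN : Int) + 1 = ((eN + 1 : Nat) : Int) := by push_cast; ring
        rw [hcast1, hcast2]
        by_cases hex : ∃ t, (eN + 1 ≤ t ∧ t < l1.length) ∧ l1[t]? = some bc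
        · -- a matching character exists to the right: first such position t0
          obtain ⟨t0, ht1, ht2, ht3, htmin'⟩ :
              ∃ t0, eN + 1 ≤ t0 ∧ t0 < l1.length ∧ l1[t0]? = some bc ∧
                ∀ u, u < t0 → ¬ ((eN + 1 ≤ u ∧ u < l1.length) ∧ l1[u]? = some bc) :=
            ⟨Nat.find hex, (Nat.find_spec hex).1.1, (Nat.find_spec hex).1.2,
              (Nat.find_spec hex).2, fun u hu => Nat.find_min hex hu⟩
          have hnobc : ∀ u, eN + 1 ≤ u → u < t0 → l1[u]? ≠ some bc := by
            intro u hu1 hu2 hu3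
            exact htmin' u hu2 ⟨⟨hu1, by omega⟩, hu3⟩
          obtain ⟨r1, r2, r3⟩ := pvA_inner_found l1 l2 map2 hmap bc hneedc (eN + 1)
            (pvUpd mem j0 (-1)) t0 ht1 ht2 ht3 hnobc
          rcases hr : pvA_inner map2 bc (l1.drop (eN + 1)) ((eN + 1 : Nat) : Int) (pvUpd mem j0 (-1))
            with ⟨e', mem'', found⟩
          rw [hr] at r1 r2 r3
          simp only at r1 r2 r3
          subst r1; subst r2
          simp only [if_true]
          -- new state (b+1, t0)
          have hsplit : ∀ j, pvCnt (pvWinE l1 (b + 1) (t0 + 1)) j =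
              pvCnt (pvWinE l1 (b + 1) (eN + 1)) j + pvCnt (pvWinE l1 (eN + 1) (t0 + 1)) j := by
            intro j
            rw [pvWinE_split l1 (by omega : b + 1 ≤ eN + 1) (by omega : eN + 1 ≤ t0 + 1) (by omega),
              pvCnt_append]
          have ht0bc : l1[t0] = bc := by
            rw [List.getElem?_eq_getElem ht2] at ht3
            exact Option.some_injective _ ht3
          have hcnt2pos : 0 < pvCnt (pvWinE l1 (eN + 1) (t0 + 1)) j0 := by
            rw [pvWinE_succ l1 ht1 ht2, pvCnt_append, pvCnt_cons, pvCnt_nil]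
            have hidx : pvIdx l1[t0] = j0 := by rw [ht0bc, hj0]
            rw [if_pos hidx]
            have := pvCnt_nonneg (pvWinE l1 (eN + 1) t0) j0
            omega
          have hcovt : pvCov l1 l2 (b + 1) t0 := by
            intro j
            rw [hsplit]
            have h1 := hcons j
            have h2 := hcov j
            have h3 := pvCnt_nonneg (pvWinE l1 (eN + 1) (t0 + 1)) j
            by_cases hji : j0 = j
            · rw [if_pos hji] at h1
              rw [hji] at hexact hcnt2pos
              omega
            · rw [if_neg hji] at h1
              omega
          have hmint : ∀ e, e < t0 → ¬ pvCov l1 l2 (b + 1) e := by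
            intro e hee hcv
            rcases Nat.lt_or_ge e (eN + 1) with h1 | h1
            · -- e ≤ eN : count of j0 is short
              have h2 := hcv j0
              have h3 : pvCnt (pvWinE l1 (b + 1) (e + 1)) j0 ≤
                  pvCnt (pvWinE l1 (b + 1) (eN + 1)) j0 :=
                pvCnt_sublist (pvWinE_sublist l1 le_rfl (by omega)) j0
              have h4 := hcons j0
              rw [if_pos rfl] at h4
              omega
            · -- eN < e < t0 : no bc between, count of j0 still short
              have h2 := hcv j0
              have hzero : pvCnt (pvWinE l1 (eN + 1) (e + 1)) j0 = 0 := by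
                rw [hj0]
                exact pvCnt_win_zero l1 bc (fun u hu1 hu2 _ => hnobc u hu1 (by omega))
              have hsplit2 : pvCnt (pvWinE l1 (b + 1) (e + 1)) j0 =
                  pvCnt (pvWinE l1 (b + 1) (eN + 1)) j0 + pvCnt (pvWinE l1 (eN + 1) (e + 1)) j0 := by
                rw [pvWinE_split l1 (by omega : b + 1 ≤ eN + 1) (by omega : eN + 1 ≤ e + 1) (by omega),
                  pvCnt_append]
              have h4 := hcons j0
              rw [if_pos rfl] at h4
              omega
          have hmemt : ∀ j, mem'' j =
              if 0 < pvCnt l2 j then pvCnt (pvWinE l1 (b + 1) (t0 + 1)) j else 0 := by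
            intro j
            rw [r3 j, hmem' j, hsplit]
            by_cases hj : 0 < pvCnt l2 j
            · rw [if_pos hj, if_pos hj, if_pos hj]
            · rw [if_neg hj, if_neg hj, if_neg hj]
              ring
          have hble : b + 1 ≤ t0 := by omega
          rw [ih (b + 1) t0 mem'' (el ++ [(t0 : Int)]) hble ht2 hcovt hmint hmemt (by omega)]
          rw [hval]
          rw [pvTail_succ l1 l2 (by omega : b + 1 < l1.length)]
          rw [pvSpecScan_first l1 l2 (b + 1) hble ht2 hcovt (fun e _ h2 => hmint e h2)]
          ring
        · -- no matching character remains: the loop ends, and no later begin can match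
          have hnobc : ∀ u, eN + 1 ≤ u → u < l1.length → l1[u]? ≠ some bc := by
            intro u hu1 hu2 hu3
            exact hex ⟨u, ⟨hu1, hu2⟩, hu3⟩
          have hnf := pvA_inner_notfound l1 map2 bc (eN + 1) (pvUpd mem j0 (-1)) hnobc
          rcases hr : pvA_inner map2 bc (l1.drop (eN + 1)) ((eN + 1 : Nat) : Int) (pvUpd mem j0 (-1))
            with ⟨e', mem'', found⟩
          rw [hr] at hnf
          simp only at hnf
          subst hnf
          simp only [if_neg (Bool.false_ne_true)]
          have htail : pvTail l1 l2 (b + 1) = 0 := by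
            apply pvTail_zero
            intro b' hb'
            apply pvSpecScan_zero
            intro e he1 he2 hcv
            have h2 := hcv j0
            have h3 : pvCnt (pvWinE l1 (b + 1) l1.length) j0 =
                pvCnt (pvWinE l1 (b + 1) (eN + 1)) j0 + pvCnt (pvWinE l1 (eN + 1) l1.length) j0 := by
              rw [pvWinE_split l1 (by omega : b + 1 ≤ eN + 1) (by omega : eN + 1 ≤ l1.length) (by omega),
                pvCnt_append]
            have hzero : pvCnt (pvWinE l1 (eN + 1) l1.length) j0 = 0 := by
              rw [hj0]
              exact pvCnt_win_zero l1 bc (fun u hu1 hu2 _ => hnobc u hu1 hu2)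
            have h4 : pvCnt (pvWinE l1 (b' ) (e + 1)) j0 ≤
                pvCnt (pvWinE l1 (b + 1) l1.length) j0 :=
              pvCnt_sublist (pvWinE_sublist l1 (by omega) (by omega)) j0
            have h5 := hcons j0
            rw [if_pos rfl] at h5
            omega
          rw [htail]
          ring
      · -- surplus: the window still covers after removing word1[begin]
        rw [if_neg hdef]
        rw [pvUpd_self, hmemj0, hmap] at hdef
        have hcov' : pvCov l1 l2 (b + 1) eN := by
          intro j
          have h1 := hcons j
          have h2 := hcov j
          by_cases hji : j0 = j
          · rw [if_pos hji] at h1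
            rw [hji] at hdef
            omega
          · rw [if_neg hji] at h1
            omega
        have hmem' : ∀ j, pvUpd mem j0 (-1) j =
            if 0 < pvCnt l2 j then pvCnt (pvWinE l1 (b + 1) (eN + 1)) j else 0 := by
          intro j
          by_cases hji : j = j0
          · rw [hji, pvUpd_self, hmemj0, if_pos hneedc, hcons, if_pos rfl]
            ring
          · have h3 : ¬ (j0 = j) := fun hh => hji hh.symm
            rw [pvUpd_ne _ _ hji, hmem, hcons, if_neg h3]
            by_cases hj : 0 < pvCnt l2 j <;> simp [hj]
        exact hstep (pvUpd mem j0 (-1)) hcov' hmem'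
    · -- unneeded character at begin
      rw [if_neg hneed]
      have hneedc : pvCnt l2 j0 = 0 := by
        have h0 := pvCnt_nonneg l2 j0
        rw [← hmap] at h0 ⊢
        omega
      have hcov' : pvCov l1 l2 (b + 1) eN := by
        intro j
        have h1 := hcons j
        have h2 := hcov j
        by_cases hji : j0 = j
        · rw [if_pos hji] at h1
          rw [hji] at hneedc
          have h3 := pvCnt_nonneg (pvWinE l1 (b + 1) (eN + 1)) j
          omega
        · rw [if_neg hji] at h1
          omega
      have hmem' : ∀ j, mem j =
          if 0 < pvCnt l2 j then pvCnt (pvWinE l1 (b + 1) (eN + 1)) j else 0 := by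
        intro j
        rw [hmem, hcons]
        by_cases hj : 0 < pvCnt l2 j
        · rw [if_pos hj, if_pos hj]
          have h3 : ¬ (j0 = j) := by
            intro hh; rw [hh] at hneedc; omega
          rw [if_neg h3]
          ring
        · rw [if_neg hj, if_neg hj]
      exact hstep mem hcov' hmem'

lemma pvB_total_aux (l1 l2 : List Char) (need : Int → Int)
    (hneed : ∀ j, need j = pvCnt l2 j) (hl2 : l2 ≠ []) :
    ∀ k s (init : Int), s + k = l1.length →
      (List.range' s k).foldl
        (fun total b => total + pvB_scan need (l1.length : Int) (l1.drop b) (b : Int)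
          (fun _ => 0) (l2.length : Int)) init
        = init + pvTail l1 l2 s := by
  intro k
  induction k with
  | zero =>
    intro s init hs
    rw [List.range'_zero, List.foldl_nil, pvTail]
    rw [dif_neg (by omega)]
    ring
  | succ k ih =>
    intro s init hs
    rw [List.range'_succ, List.foldl_cons]
    rw [ih (s + 1) _ (by omega)]
    have hsl : s < l1.length := by omega
    have hscan : pvB_scan need (l1.length : Int) (l1.drop s) (s : Int) (fun _ => 0) (l2.length : Int)
        = pvSpecScan l1 l2 s s := by
      apply pvB_scan_spec l1 l2 need hneed s s (fun _ => 0) _ le_rfl (by omega)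
      · intro j
        rw [pvWinE_nil l1 le_rfl, pvCnt_nil]
      · rw [pvMatched_zero]
        ring
      · have : 0 < l2.length := List.length_pos_iff.mpr hl2
        intro hz
        omega
    rw [hscan, pvTail_succ l1 l2 hsl]
    ring

lemma pvB_total (l1 l2 : List Char) (need : Int → Int)
    (hneed : ∀ j, need j = pvCnt l2 j) (hl2 : l2 ≠ []) :
    (List.range l1.length).foldl
      (fun total b => total + pvB_scan need (l1.length : Int) (l1.drop b) (b : Int)
        (fun _ => 0) (l2.length : Int)) 0
      = pvTail l1 l2 0 := by
  rw [List.range_eq_range', pvB_total_aux l1 l2 need hneed hl2 l1.length 0 0 (by omega)]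
  ring

theorem main_equiv (w1 w2 : String) (hl2ne : w2.toList ≠ []) :
    validSubstringCount w1 w2 = validSubstringCount_alt w1 w2 := by
  unfold validSubstringCount validSubstringCount_alt
  simp only []
  set l1 := w1.toList with hl1def
  set l2 := w2.toList with hl2def
  by_cases hnm : (l1.length : Int) < (l2.length : Int)
  · rw [if_pos hnm, if_pos hnm]
  · rw [if_neg hnm, if_neg hnm]
    have hmap : ∀ j, pvCount26 l2 j = pvCnt l2 j := pvCount26_apply l2
    have hBtotal := pvB_total l1 l2 (pvCount26 l2) hmap hl2ne
    rw [hBtotal]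
    have hmem0 : ∀ j : Int, (fun _ : Int => (0:Int)) j =
        if 0 < pvCnt l2 j then pvCnt (pvWinE l1 0 0) j else 0 := by
      intro j
      rw [pvWinE_nil l1 le_rfl, pvCnt_nil]
      simp
    have hmtch0 : (0:Int) = pvMatched l2 (fun j => pvCnt (pvWinE l1 0 0) j) := by
      rw [show (fun j => pvCnt (pvWinE l1 0 0) j) = (fun _ : Int => (0:Int)) from
        funext (fun j => by rw [pvWinE_nil l1 le_rfl, pvCnt_nil])]
      rw [pvMatched_zero]
    have hscan := pvA_scan_spec l1 l2 (pvCount26 l2) hmap hl2ne 0 (fun _ => 0) 0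
      (Nat.zero_le _) hmem0 hmtch0 (fun e he => absurd he (Nat.not_lt_zero e))
    rw [List.drop_zero, Nat.cast_zero] at hscan
    rcases hscan with ⟨e0, _, he0n, hcov0, hmin0, hr1, hr2, hr3⟩ | ⟨hnone, hrne⟩
    · rw [if_neg (by rw [hr2]; simp)]
      rw [hr1]
      have hloop := pvA_loop_spec l1 l2 (pvCount26 l2) hmap hl2ne (l1.length + 1) 0 e0
        (pvA_scan (pvCount26 l2) (l2.length : Int) l1 0 (fun _ => 0) 0).1
        [(e0 : Int)] (Nat.zero_le _) he0n hcov0 hmin0 hr3 (by omega)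
      rw [hloop]
      have h0n : 0 < l1.length := by omega
      rw [pvTail_succ l1 l2 h0n]
      rw [pvSpecScan_first l1 l2 0 (Nat.zero_le e0) he0n hcov0 (fun e _ h2 => hmin0 e h2)]
      simp
    · rw [if_pos hrne]
      rw [pvTail_zero l1 l2 (fun b' _ => pvSpecScan_zero l1 l2 b'
        (fun e _ he2 hcv => hnone e he2 (pvCov_mono l1 l2 (Nat.zero_le b') le_rfl hcv)))]

-- ===== VERDICT (by name: the statement is the Claim_ definition above) =====
theorem validSubstringCount_spec : Claim_equal_validSubstringCount := by
  unfold Claim_equal_validSubstringCount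
  intro w1 w2 hdom hpre
  unfold Spec_validSubstringCount
  obtain ⟨hne, -, -⟩ := hpre
  exact main_equiv w1 w2 hne
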